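-- pv_equiv track=rewrite | github.com/chandrasekharreddy-7/python | LAB/lab1/Q10.py | distChar
-- ===== SOURCE A (Python) =====
-- def distChar(str1, str2):
--     new_str = ""
--     for ch in str1:
--         if ch not in str2 and ch not in new_str:
--             new_str += ch
--     for ch in str2:
--         if ch not in str1 and ch not in new_str:
--             new_str += ch
--     new_str = sorted(new_str)
--     result = ""
--     for ch in new_str:
--         result += ch
--     if result != "":
--         return result
--     else:
--         return "' '"
-- ===== SOURCE B (Python) =====
-- def distChar(str1, str2):
--     cnt = {}
--     for ch in set(str1):
--         cnt[ch] = cnt.get(ch, 0) + 1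
--     for ch in set(str2):
--         cnt[ch] = cnt.get(ch, 0) + 1
--     result = "".join(sorted(ch for ch, c in cnt.items() if c == 1))
--     return result if result != "" else "' '"
-- ===== Notes on version B (the rewrite author's own statement) =====
-- stated objective: faster
-- what changed: Replaces A's two collecting scans with in-place string membership tests and dedup by a frequency dict over the two per-string character sets, then one filtered pass keeping characters counted exactly once.
import Mathlib
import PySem

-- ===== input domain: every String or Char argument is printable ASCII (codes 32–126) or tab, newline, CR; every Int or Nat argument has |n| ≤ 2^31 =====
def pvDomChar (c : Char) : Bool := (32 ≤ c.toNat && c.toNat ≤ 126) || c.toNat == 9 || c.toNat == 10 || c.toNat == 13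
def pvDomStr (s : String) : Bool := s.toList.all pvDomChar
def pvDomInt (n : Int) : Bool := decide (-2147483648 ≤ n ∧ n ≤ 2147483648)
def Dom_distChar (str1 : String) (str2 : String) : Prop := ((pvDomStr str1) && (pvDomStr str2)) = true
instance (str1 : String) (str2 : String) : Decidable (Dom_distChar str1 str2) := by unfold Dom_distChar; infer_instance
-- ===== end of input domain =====

-- B replaces A's quadratic membership-test scans by a character-frequency dict filtered for count 1 (faster).

-- ===== PORT A =====
def distChar (str1 : String) (str2 : String) : String :=
  let ns1 : List Char :=
    str1.toList.foldl
      (fun acc ch => if ¬ str2.toList.contains ch ∧ ¬ acc.contains ch then acc ++ [ch] else acc) []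
  let ns2 : List Char :=
    str2.toList.foldl
      (fun acc ch => if ¬ str1.toList.contains ch ∧ ¬ acc.contains ch then acc ++ [ch] else acc) ns1
  let sortedChars := PySem.List.sorted ns2 (fun x => x) false
  let result : List Char := sortedChars.foldl (fun acc ch => acc ++ [ch]) []
  if String.ofList result ≠ "" then String.ofList result else "' '"

-- ===== PORT B =====
def distChar_alt (str1 : String) (str2 : String) : String :=
  let cnt1 : PySem.Dict Char Int :=
    (PySem.Set.ofList str1.toList).foldl (fun d ch => d.modify ch 0 (· + 1)) PySem.Dict.empty
  let cnt : PySem.Dict Char Int :=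
    (PySem.Set.ofList str2.toList).foldl (fun d ch => d.modify ch 0 (· + 1)) cnt1
  let result : String :=
    String.ofList (PySem.List.sorted ((cnt.items.filter (fun p => p.2 == (1 : Int))).map Prod.fst)
      (fun x => x) false)
  if result ≠ "" then result else "' '"

-- ===== PRECONDITION & SPEC =====
def Spec_distChar (str1 : String) (str2 : String) (out : String) : Prop := out = distChar_alt str1 str2
instance (str1 : String) (str2 : String) (out : String) : Decidable (Spec_distChar str1 str2 out) := by unfold Spec_distChar; infer_instance

-- ===== CLAIM (what is proved, stated in full; the proofs are below) =====
def Claim_equal_distChar : Prop := ∀ (str1 : String) (str2 : String), Dom_distChar str1 str2 → Spec_distChar str1 str2 (distChar str1 str2)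

-- ===== LEMMAS AND PROOFS =====

-- A's collecting loop: membership in the accumulated dedup list
theorem mem_foldA (s : List Char) (l : List Char) :
    ∀ (acc : List Char) (x : Char),
      x ∈ l.foldl (fun acc ch => if ¬ s.contains ch ∧ ¬ acc.contains ch then acc ++ [ch] else acc) acc
        ↔ x ∈ acc ∨ (x ∈ l ∧ x ∉ s) := by
  induction l with
  | nil => simp
  | cons c t ih =>
      intro acc x
      simp only [List.foldl_cons]
      by_cases hc : ¬ s.contains c ∧ ¬ acc.contains c
      · rw [if_pos hc, ih]
        simp only [List.mem_append, List.mem_cons, List.not_mem_nil, or_false]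
        constructor
        · rintro (⟨h | h⟩ | ⟨h1, h2⟩)
          · exact Or.inl h
          · subst h
            exact Or.inr ⟨Or.inl rfl, by simpa using hc.1⟩
          · exact Or.inr ⟨Or.inr h1, h2⟩
        · rintro (h | ⟨h1 | h1, h2⟩)
          · exact Or.inl (Or.inl h)
          · exact Or.inl (Or.inr h1)
          · exact Or.inr ⟨h1, h2⟩
      · rw [if_neg hc, ih]
        push Not at hc
        simp only [List.mem_cons]
        constructor
        · rintro (h | ⟨h1, h2⟩)
          · exact Or.inl h
          · exact Or.inr ⟨Or.inr h1, h2⟩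
        · rintro (h | ⟨h1 | h1, h2⟩)
          · exact Or.inl h
          · subst h1
            by_cases hs : s.contains x
            · exact absurd (by simpa using hs) h2
            · exact Or.inl (by simpa using hc (by simpa using hs))
          · exact Or.inr ⟨h1, h2⟩

-- A's collecting loop preserves Nodup
theorem nodup_foldA (s : List Char) (l : List Char) :
    ∀ (acc : List Char), acc.Nodup →
      (l.foldl (fun acc ch => if ¬ s.contains ch ∧ ¬ acc.contains ch then acc ++ [ch] else acc) acc).Nodup := by
  induction l with
  | nil => intro acc h; simpa using h
  | cons c t ih =>
      intro acc h
      simp only [List.foldl_cons]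
      by_cases hc : ¬ s.contains c ∧ ¬ acc.contains c
      · rw [if_pos hc]
        exact ih _ (by
          refine List.Nodup.append h (List.nodup_singleton c) ?_
          intro a ha hb
          simp only [List.mem_singleton] at hb
          subst hb
          exact hc.2 (by simpa using ha))
      · rw [if_neg hc]; exact ih _ h

-- final concatenating loop is the identity
theorem foldl_append_id (l : List Char) : ∀ acc : List Char,
    l.foldl (fun acc ch => acc ++ [ch]) acc = acc ++ l := by
  induction l with
  | nil => simp
  | cons c t ih => intro acc; simp [ih]

theorem distChar_spec : Claim_equal_distChar := by
  intro str1 str2 _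
  show distChar str1 str2 = distChar_alt str1 str2
  simp only [distChar, distChar_alt]
  set l1 := str1.toList with hl1
  set l2 := str2.toList with hl2
  set S1 := PySem.Set.ofList l1 with hS1
  set S2 := PySem.Set.ofList l2 with hS2
  -- B's dict is Counter (S1 ++ S2)
  have hcnt :
      S2.foldl (fun d ch => d.modify ch 0 (· + 1))
        (S1.foldl (fun d ch => d.modify ch 0 (· + 1)) PySem.Dict.empty)
      = PySem.Dict.counter (S1 ++ S2) := by
    rw [PySem.Dict.counter_eq_foldl, List.foldl_append]
  rw [hcnt]
  -- the two pre-sort lists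
  set LA := l2.foldl
      (fun acc ch => if ¬ l1.contains ch ∧ ¬ acc.contains ch then acc ++ [ch] else acc)
      (l1.foldl (fun acc ch => if ¬ l2.contains ch ∧ ¬ acc.contains ch then acc ++ [ch] else acc) [])
    with hLA
  set LB := (((PySem.Dict.counter (S1 ++ S2)).items.filter (fun p => p.2 == (1 : Int))).map Prod.fst)
    with hLB
  have hLB' : LB = (PySem.Set.ofList (S1 ++ S2)).filter
      (fun k => (((S1 ++ S2).count k : Int) == (1 : Int))) := by
    rw [hLB, PySem.Dict.items_counter, List.filter_map, List.map_map]
    simp [Function.comp_def]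
  have memLA : ∀ x, x ∈ LA ↔ (x ∈ l1 ∧ x ∉ l2) ∨ (x ∈ l2 ∧ x ∉ l1) := by
    intro x
    rw [hLA, mem_foldA, mem_foldA]
    simp only [List.not_mem_nil, false_or]
  have hnd1 : S1.Nodup := PySem.Set.nodup_ofList l1
  have hnd2 : S2.Nodup := PySem.Set.nodup_ofList l2
  have memS1 : ∀ x : Char, x ∈ S1 ↔ x ∈ l1 := fun x => PySem.Set.mem_ofList _ _
  have memS2 : ∀ x : Char, x ∈ S2 ↔ x ∈ l2 := fun x => PySem.Set.mem_ofList _ _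
  have countS : ∀ (x : Char) (S : List Char), S.Nodup → S.count x = if x ∈ S then 1 else 0 := by
    intro x S hnd
    by_cases h : x ∈ S
    · rw [if_pos h]
      exact List.count_eq_one_of_mem hnd h
    · rw [if_neg h]
      exact List.count_eq_zero_of_not_mem h
  have memLB : ∀ x, x ∈ LB ↔ (x ∈ l1 ∧ x ∉ l2) ∨ (x ∈ l2 ∧ x ∉ l1) := by
    intro x
    rw [hLB', List.mem_filter]
    have hm : x ∈ PySem.Set.ofList (S1 ++ S2) ↔ x ∈ l1 ∨ x ∈ l2 := by
      rw [PySem.Set.mem_ofList, List.mem_append, memS1, memS2]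
    have hcount : (S1 ++ S2).count x = S1.count x + S2.count x := List.count_append ..
    rw [hm, hcount, countS x S1 hnd1, countS x S2 hnd2]
    by_cases h1 : x ∈ l1 <;> by_cases h2 : x ∈ l2 <;>
      simp [memS1, memS2, h1, h2]
  have ndLA : LA.Nodup := by
    rw [hLA]
    exact nodup_foldA _ _ _ (nodup_foldA _ _ _ List.nodup_nil)
  have ndLB : LB.Nodup := by
    rw [hLB']
    exact List.Nodup.filter _ (PySem.Set.nodup_ofList _)
  have hperm : LA.Perm LB := by
    rw [List.perm_ext_iff_of_nodup ndLA ndLB]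
    intro a; rw [memLA, memLB]
  have hsorted : PySem.List.sorted LA (fun x => x) false
      = PySem.List.sorted LB (fun x => x) false :=
    PySem.List.sorted_eq_sorted_of_perm LA LB (fun x => x) (fun _ _ h => h) hperm
  rw [foldl_append_id, List.nil_append, hsorted]

-- ===== VERDICT (by name: the statement is the Claim_ definition above) =====
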